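-- pv_equiv track=rewrite | github.com/Cybrito-Labs/CipherVerse | CipherVerse_backend.py | becon_encoder
-- ===== SOURCE A (Python) =====
-- def becon_encoder(data):
--     BACON_TABLE = {
--         'A': 'AAAAA', 'B': 'AAAAB', 'C': 'AAABA', 'D': 'AAABB', 'E': 'AABAA',
--         'F': 'AABAB', 'G': 'AABBA', 'H': 'AABBB', 'I': 'ABAAA', 'J': 'ABAAB',
--         'K': 'ABABA', 'L': 'ABABB', 'M': 'ABBAA', 'N': 'ABBAB', 'O': 'ABBBA',
--         'P': 'ABBBB', 'Q': 'BAAAA', 'R': 'BAAAB', 'S': 'BAABA', 'T': 'BAABB',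
--         'U': 'BABAA', 'V': 'BABAB', 'W': 'BABBA', 'X': 'BABBB', 'Y': 'BBAAA',
--         'Z': 'BBAAB'
--     }
--
--     # Reverse table for decoding
--     REVERSE_BACON_TABLE = {v: k for k, v in BACON_TABLE.items()}
--     result = []
--     for char in data.upper():
--         if char.isalpha():
--             result.append(BACON_TABLE[char])
--     return " ".join(result)
-- ===== SOURCE B (Python) =====
-- def becon_encoder(data):
--     # Bacon code of a letter = 5-bit binary of its 0-based index, '0'->'A', '1'->'B'.
--     out = []
--     for ch in data:
--         if ch.isalpha():
--             n = ord(ch.upper()) - 65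
--             out.append(''.join('AB'[(n >> k) & 1] for k in range(4, -1, -1)))
--     return ' '.join(out)
-- ===== Notes on version B (the rewrite author's own statement) =====
-- stated objective: simpler
-- what changed: Replaces the 26-entry lookup table by arithmetic: each Bacon codeword is the 5-bit binary of the letter's alphabet index rendered with the two Bacon symbols, iterating the original string instead of upper-casing it first.
import Mathlib
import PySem

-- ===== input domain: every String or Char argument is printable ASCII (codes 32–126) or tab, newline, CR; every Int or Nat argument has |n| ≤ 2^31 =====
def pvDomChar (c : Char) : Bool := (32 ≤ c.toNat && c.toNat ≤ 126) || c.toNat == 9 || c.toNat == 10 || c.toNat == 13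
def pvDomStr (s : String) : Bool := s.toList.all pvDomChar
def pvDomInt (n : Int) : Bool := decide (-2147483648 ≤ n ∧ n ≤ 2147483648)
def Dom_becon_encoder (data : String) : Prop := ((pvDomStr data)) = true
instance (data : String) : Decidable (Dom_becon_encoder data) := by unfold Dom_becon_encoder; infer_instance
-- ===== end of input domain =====

-- B replaces A's 26-entry lookup table by arithmetic on the letter index (simpler); same return value on all of Dom.

-- ===== PORT A =====
-- A's BACON_TABLE (a local constant in the Python; lifted to a top-level helper).
def baconTable : PySem.Dict Char String := PySem.Dict.ofList
  [('A', "AAAAA"), ('B', "AAAAB"), ('C', "AAABA"), ('D', "AAABB"), ('E', "AABAA"),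
   ('F', "AABAB"), ('G', "AABBA"), ('H', "AABBB"), ('I', "ABAAA"), ('J', "ABAAB"),
   ('K', "ABABA"), ('L', "ABABB"), ('M', "ABBAA"), ('N', "ABBAB"), ('O', "ABBBA"),
   ('P', "ABBBB"), ('Q', "BAAAA"), ('R', "BAAAB"), ('S', "BAABA"), ('T', "BAABB"),
   ('U', "BABAA"), ('V', "BABAB"), ('W', "BABBA"), ('X', "BABBB"), ('Y', "BBAAA"),
   ('Z', "BBAAB")]

-- (A also builds an unused REVERSE_BACON_TABLE; it does not affect the result and is omitted.)
-- BACON_TABLE[char]: on Dom every char passing isalpha upper-cases to an A–Z table key, so the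
-- lookup never misses (no KeyError); getD's default is unreachable there.
def becon_encoder (data : String) : String :=
  PySem.Str.join " "
    ((PySem.Str.upper data).toList.foldl
      (fun result char =>
        if PySem.Chars.isalpha char then result ++ [(baconTable.get? char).getD ""] else result)
      [])

-- ===== PORT B =====
-- ''.join('AB'[(n >> k) & 1] for k in range(4, -1, -1))
def baconCode (n : Nat) : String :=
  String.ofList ((PySem.List.pyRange 4 (-1) (-1)).map
    (fun k => if (n >>> k.toNat) % 2 == 1 then 'B' else 'A'))

def becon_encoder_alt (data : String) : String :=
  PySem.Str.join " "
    (data.toList.foldl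
      (fun out ch =>
        if PySem.Chars.isalpha ch then
          out ++ [baconCode ((PySem.Chars.upperChar ch).toNat - 65)]
        else out)
      [])

-- ===== PRECONDITION & SPEC =====
def Spec_becon_encoder (data : String) (out : String) : Prop := out = becon_encoder_alt data
instance (data : String) (out : String) : Decidable (Spec_becon_encoder data out) := by unfold Spec_becon_encoder; infer_instance

-- ===== CLAIM (what is proved, stated in full; the proofs are below) =====
def Claim_equal_becon_encoder : Prop := ∀ (data : String), Dom_becon_encoder data → Spec_becon_encoder data (becon_encoder data)

-- ===== LEMMAS AND PROOFS =====

-- All chars admitted by Dom (codes 9, 10, 13, 32–126) lie in this list.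
def pvAscii : List Char := (List.range 127).map Char.ofNat

lemma mem_pvAscii (c : Char) (h : pvDomChar c = true) : c ∈ pvAscii := by
  have hlt : c.toNat < 127 := by
    simp [pvDomChar] at h
    omega
  exact List.mem_map.mpr ⟨c.toNat, List.mem_range.mpr hlt, Char.ofNat_toNat c⟩

-- The per-character contributions of the two ports agree on every ASCII char.
lemma step_eq (c : Char) (h : c ∈ pvAscii) :
    (if PySem.Chars.isalpha (PySem.Chars.upperChar c) then
        some ((baconTable.get? (PySem.Chars.upperChar c)).getD "") else none)
      = (if PySem.Chars.isalpha c then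
          some (baconCode ((PySem.Chars.upperChar c).toNat - 65)) else none) := by
  fin_cases h <;> decide

lemma fold_eq (l : List Char) (hl : ∀ c ∈ l, pvDomChar c = true) (acc : List String) :
    (l.map PySem.Chars.upperChar).foldl
      (fun result char =>
        if PySem.Chars.isalpha char then result ++ [(baconTable.get? char).getD ""] else result)
      acc
    = l.foldl
      (fun out ch =>
        if PySem.Chars.isalpha ch then
          out ++ [baconCode ((PySem.Chars.upperChar ch).toNat - 65)]
        else out)
      acc := by
  induction l generalizing acc with
  | nil => rfl
  | cons c l ih =>
    have hc := step_eq c (mem_pvAscii c (hl c (List.mem_cons_self)))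
    simp only [List.map_cons, List.foldl_cons]
    rw [show (if PySem.Chars.isalpha (PySem.Chars.upperChar c) then
          acc ++ [(baconTable.get? (PySem.Chars.upperChar c)).getD ""] else acc)
        = (if PySem.Chars.isalpha c then
            acc ++ [baconCode ((PySem.Chars.upperChar c).toNat - 65)] else acc) from ?_]
    · exact ih (fun x hx => hl x (List.mem_cons_of_mem _ hx)) _
    · by_cases ha : PySem.Chars.isalpha c = true
      · simp [ha] at hc ⊢
        rcases hc with ⟨h1, h2⟩
        simp [h1, h2]
      · simp [Bool.not_eq_true] at ha
        simp [ha] at hc ⊢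
        simp [hc]

-- ===== VERDICT (by name: the statement is the Claim_ definition above) =====
theorem becon_encoder_spec : Claim_equal_becon_encoder := by
  intro data hdom
  unfold Spec_becon_encoder becon_encoder becon_encoder_alt
  have hup : (PySem.Str.upper data).toList = data.toList.map PySem.Chars.upperChar := by
    simp [PySem.Str.toList_upper, PySem.Chars.upper]
  rw [hup, fold_eq]
  intro c hc
  have := (List.all_eq_true.mp hdom) c hc
  simpa using this
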